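-- pv_equiv track=rewrite | github.com/RKramare/advent-of-code-2021 | aoc02.py | handle_command
-- ===== SOURCE A (Python) =====
-- def handle_command(input, horizontal, depth):
--     for command, value in input:
--         if command == "forward":
--             horizontal += value
--         if command == "down":
--             depth += value
--         if command == "up":
--             depth -= value
--     return horizontal, depth
-- ===== SOURCE B (Python) =====
-- def handle_command(input, horizontal, depth):
--     items = list(input)
--     h = horizontal + sum(v for c, v in items if c == "forward")
--     d = depth + sum(v for c, v in items if c == "down") - sum(v for c, v in items if c == "up")
--     return h, d
-- ===== Notes on version B (the rewrite author's own statement) =====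
-- stated objective: idiomatic
-- what changed: Replaces the single interleaved branching loop over mutable accumulators with three independent filtered sum() passes, one per command kind.
import Mathlib
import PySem

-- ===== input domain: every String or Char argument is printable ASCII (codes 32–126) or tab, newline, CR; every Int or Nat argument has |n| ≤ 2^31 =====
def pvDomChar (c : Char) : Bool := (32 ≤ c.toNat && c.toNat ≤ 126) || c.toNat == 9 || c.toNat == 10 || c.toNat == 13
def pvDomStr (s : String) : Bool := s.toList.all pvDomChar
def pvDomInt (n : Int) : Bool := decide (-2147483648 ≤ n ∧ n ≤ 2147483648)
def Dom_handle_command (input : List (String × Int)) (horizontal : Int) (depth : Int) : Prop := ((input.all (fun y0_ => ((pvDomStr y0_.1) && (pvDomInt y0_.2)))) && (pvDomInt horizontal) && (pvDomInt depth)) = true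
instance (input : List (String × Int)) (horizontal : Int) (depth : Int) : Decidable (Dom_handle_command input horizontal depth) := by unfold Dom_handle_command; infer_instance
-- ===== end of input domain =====

-- B replaces A's interleaved branching loop with three independent filtered sums (idiomatic decomposition).


-- ===== PORT A =====
-- fold over (horizontal, depth), three independent if's in A's order
def handle_command (input : List (String × Int)) (horizontal : Int) (depth : Int) : Int × Int :=
  input.foldl
    (fun (st : Int × Int) cv =>
      let st1 := if cv.1 == "forward" then (st.1 + cv.2, st.2) else st
      let st2 := if cv.1 == "down" then (st1.1, st1.2 + cv.2) else st1
      if cv.1 == "up" then (st2.1, st2.2 - cv.2) else st2)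
    (horizontal, depth)

-- ===== PORT B =====
-- three filtered sums
def handle_command_alt (input : List (String × Int)) (horizontal : Int) (depth : Int) : Int × Int :=
  let h := horizontal + ((input.filter (fun cv => cv.1 == "forward")).map Prod.snd).sum
  let d := depth + ((input.filter (fun cv => cv.1 == "down")).map Prod.snd).sum
             - ((input.filter (fun cv => cv.1 == "up")).map Prod.snd).sum
  (h, d)

-- ===== PRECONDITION & SPEC =====
def Spec_handle_command (input : List (String × Int)) (horizontal : Int) (depth : Int) (out : Int × Int) : Prop := out = handle_command_alt input horizontal depth
instance (input : List (String × Int)) (horizontal : Int) (depth : Int) (out : Int × Int) : Decidable (Spec_handle_command input horizontal depth out) := by unfold Spec_handle_command; infer_instance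

-- ===== CLAIM (what is proved, stated in full; the proofs are below) =====
def Claim_equal_handle_command : Prop := ∀ (input : List (String × Int)) (horizontal : Int) (depth : Int), Dom_handle_command input horizontal depth → Spec_handle_command input horizontal depth (handle_command input horizontal depth)

-- ===== LEMMAS AND PROOFS =====
theorem handle_command_eq (input : List (String × Int)) (horizontal depth : Int) :
    handle_command input horizontal depth = handle_command_alt input horizontal depth := by
  induction input generalizing horizontal depth with
  | nil => simp [handle_command, handle_command_alt]
  | cons cv tl ih =>
    simp only [handle_command, List.foldl_cons] at *
    simp only [handle_command_alt, List.filter_cons]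
    by_cases h1 : cv.1 == "forward" <;> by_cases h2 : cv.1 == "down" <;> by_cases h3 : cv.1 == "up" <;>
      simp_all [handle_command_alt] <;> ring_nf

-- ===== VERDICT (by name: the statement is the Claim_ definition above) =====
theorem handle_command_spec : Claim_equal_handle_command := by
  intro input h d _
  exact handle_command_eq input h d
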